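-- pv_equiv track=rewrite | github.com/piMateusz/BPMN | bpmn_app/bpmn_utils/alpha_algorithm.py | delete_unconnected_nodes
-- ===== SOURCE A (Python) =====
-- from collections import defaultdict, Counter
-- import copy
--
-- def find_node_successors_and_predecessors(graph_dict, node):
--     """
--     :return: node successors (Counter objec) and predecessors (list)
--     """
--     node_successors = Counter()
--     node_predecessors = []
--     for event, succesors in graph_dict.items():
--         if event == node:
--             if succesors:
--                 node_successors = succesors
--         for succesor, cnt in succesors.items():
--             if succesor == node:
--                 node_predecessors.append(event)
--     return node_predecessors, node_successors
--
-- def delete_unconnected_nodes(graph_dict, start_node_name, end_node_name):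
--     """
--     Delete not fully connected nodes and edges that are not in 'main path'
--     :return: changed graph dictionary
--     """
--     temp_dict = copy.deepcopy(graph_dict)
--     is_unconnected_node = True
--     while is_unconnected_node:
--         is_unconnected_node = False
--         for event, succesors in graph_dict.items():
--             # omit start and end event in checking connections - these nodes have only inputs or outputs
--             if event in [start_node_name, end_node_name]:
--                 continue
--             node_predecessors, node_successors = find_node_successors_and_predecessors(temp_dict, event)
--             if not node_predecessors or not node_successors:
--                 is_unconnected_node = True
--                 # node doesn't have either any predecessors or successors
--                 # delete node (therefore node -> successors edges)
--                 temp_dict.pop(event, None)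
--                 # delete predecessors -> node edges
--                 for node_predecessor in node_predecessors:
--                     temp_dict[node_predecessor].pop(event, None)
--                 graph_dict = copy.deepcopy(temp_dict)
--                 break
--     return temp_dict
-- ===== SOURCE B (Python) =====
-- def delete_unconnected_nodes(graph_dict, start_node_name, end_node_name):
--     """Round-based simultaneous pruning: keep shrinking the set of alive nodes
--     (a node stays alive iff it is start/end or has an alive predecessor and a
--     surviving successor) until stable, then rebuild the dict in one pass."""
--     alive = set(graph_dict)
--     while True:
--         keep = set()
--         for k, su in graph_dict.items():
--             if k not in alive:
--                 continue
--             if k == start_node_name or k == end_node_name: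
--                 keep.add(k)
--                 continue
--             has_pred = any(p in alive and k in psu for p, psu in graph_dict.items())
--             has_succ = any(t not in graph_dict or t in alive for t in su)
--             if has_pred and has_succ:
--                 keep.add(k)
--         if len(keep) == len(alive):
--             return {k: {t: c for t, c in su.items() if t not in graph_dict or t in alive}
--                     for k, su in graph_dict.items() if k in alive}
--         alive = keep
-- ===== Notes on version B (the rewrite author's own statement) =====
-- stated objective: alternative
-- what changed: A deletes one unconnected node at a time, restarting a full scan (with two deepcopies and a per-node predecessor/successor recomputation) after every single deletion; B instead keeps a set of alive keys, shrinks it in simultaneous rounds (a node survives a round iff it is start/end or has an alive predecessor and a surviving successor) until a fixpoint, and rebuilds the pruned dict in one final pass.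
import Mathlib
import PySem

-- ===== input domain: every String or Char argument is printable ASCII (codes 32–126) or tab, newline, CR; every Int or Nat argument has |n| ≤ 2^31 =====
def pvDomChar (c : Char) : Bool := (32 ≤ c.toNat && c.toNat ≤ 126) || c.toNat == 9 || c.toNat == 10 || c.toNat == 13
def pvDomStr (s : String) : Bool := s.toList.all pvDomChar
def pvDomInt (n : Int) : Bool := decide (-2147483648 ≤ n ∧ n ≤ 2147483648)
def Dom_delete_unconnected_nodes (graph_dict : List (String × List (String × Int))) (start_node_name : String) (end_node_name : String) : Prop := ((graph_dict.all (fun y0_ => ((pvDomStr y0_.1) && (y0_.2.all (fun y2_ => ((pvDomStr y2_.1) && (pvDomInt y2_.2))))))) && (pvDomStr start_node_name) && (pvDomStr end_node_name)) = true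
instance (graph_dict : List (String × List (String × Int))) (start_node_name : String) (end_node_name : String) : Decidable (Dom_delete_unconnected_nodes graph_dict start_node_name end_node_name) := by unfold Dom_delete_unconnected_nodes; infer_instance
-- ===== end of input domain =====

-- B replaces A's restart-the-whole-scan-after-each-single-deletion loop (with a deepcopy per deletion)
-- by simultaneous rounds over a shrinking 'alive' key set, rebuilding the dict once at the end ('alternative').
-- dicts are assoc lists with distinct keys (Pre_); dict ops are hand-ported (pop = filter, lookup = the
-- entry's own row), exact on that domain.

abbrev pvG : Type := List (String × List (String × Int))

-- ===== PORT A =====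
-- find_node_successors_and_predecessors: one pass collecting (predecessor list, successor dict)
def pvFindNSP (graph : pvG) (node : String) : List String × List (String × Int) :=
  graph.foldl
    (fun acc es =>
      (es.2.foldl (fun ps sc => if sc.1 = node then ps ++ [es.1] else ps) acc.1,
       if es.1 = node ∧ es.2 ≠ [] then es.2 else acc.2))
    ([], [])

-- the for-loop of A's while-body: first event (≠ start/end) with no predecessors or no successors
def pvScan (temp : pvG) (s e : String) : pvG → Option (String × List String)
  | [] => none
  | kv :: rest =>
    if kv.1 = s ∨ kv.1 = e then pvScan temp s e rest
    else
      let r := pvFindNSP temp kv.1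
      if r.1 = [] ∨ r.2 = [] then some (kv.1, r.1)
      else pvScan temp s e rest

-- A's while-loop; after each deletion Python rebinds graph_dict := deepcopy(temp_dict), so every scan
-- runs over the current temp.  fuel = |graph_dict|+1 bounds the iterations (each deletion shrinks temp).
def pvALoop (s e : String) : Nat → pvG → pvG
  | 0, temp => temp
  | Nat.succ fuel, temp =>
    match pvScan temp s e temp with
    | none => temp
    | some (ev, preds) =>
      -- temp_dict.pop(event, None): exact as filter on distinct keys
      let t1 := temp.filter (fun q => decide (q.1 ≠ ev))
      -- for p in preds: temp_dict[p].pop(event, None)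
      let t2 := preds.foldl
        (fun t p => t.map (fun q => if q.1 = p then (q.1, q.2.filter (fun sc => decide (sc.1 ≠ ev))) else q)) t1
      pvALoop s e fuel t2

def delete_unconnected_nodes (graph_dict : pvG) (start_node_name : String) (end_node_name : String) : pvG :=
  pvALoop start_node_name end_node_name (graph_dict.length + 1) graph_dict

-- ===== PORT B =====
-- t in graph_dict (key membership)
def pvIsKey (g : pvG) (t : String) : Bool := g.any (fun q => q.1 == t)

-- one simultaneous round: keep = {k alive : k is start/end, or k has an alive predecessor and a surviving successor}
def pvRound (g : pvG) (s e : String) (alive : List String) : List String :=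
  g.foldl
    (fun keep kv =>
      if kv.1 ∈ alive then
        if kv.1 = s ∨ kv.1 = e then PySem.Set.add keep kv.1
        else
          if (g.any (fun pe => decide (pe.1 ∈ alive) && pe.2.any (fun sc => sc.1 == kv.1)))
              && (kv.2.any (fun t => !(pvIsKey g t.1) || decide (t.1 ∈ alive)))
          then PySem.Set.add keep kv.1
          else keep
      else keep)
    []

-- the final dict comprehension of Source B
def pvBFinal (g : pvG) (alive : List String) : pvG :=
  g.filterMap (fun kv =>
    if kv.1 ∈ alive then
      some (kv.1, kv.2.filter (fun t => !(pvIsKey g t.1) || decide (t.1 ∈ alive)))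
    else none)

-- Source B's while-loop; each non-final round strictly shrinks alive, so fuel = |graph_dict|+2 is never
-- exhausted (the fuel-0 branch is unreachable and returns the same final projection)
def pvBLoop (g : pvG) (s e : String) : Nat → List String → pvG
  | 0, alive => pvBFinal g alive
  | Nat.succ fuel, alive =>
    let keep := pvRound g s e alive
    if keep.length = alive.length then pvBFinal g alive
    else pvBLoop g s e fuel keep

def delete_unconnected_nodes_alt (graph_dict : pvG) (start_node_name : String) (end_node_name : String) : pvG :=
  pvBLoop graph_dict start_node_name end_node_name (graph_dict.length + 2)
    (PySem.Set.ofList (graph_dict.map Prod.fst))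

-- ===== PRECONDITION & SPEC =====
-- Pre_ excludes association lists whose outer or inner key lists have duplicates: those do not represent
-- a Python dict (A's argument is a dict, which cannot carry duplicate keys), so nothing is claimed there.
def Pre_delete_unconnected_nodes (graph_dict : pvG) (start_node_name : String) (end_node_name : String) : Prop :=
  (graph_dict.map Prod.fst).Nodup ∧ ∀ kv ∈ graph_dict, (kv.2.map Prod.fst).Nodup
instance (graph_dict : pvG) (start_node_name : String) (end_node_name : String) : Decidable (Pre_delete_unconnected_nodes graph_dict start_node_name end_node_name) := by unfold Pre_delete_unconnected_nodes; infer_instance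

def pvWitness_delete_unconnected_nodes : (List (String × List (String × Int))) × String × String :=
  ([("start", [("a", 1)]), ("a", [("end", 2)]), ("b", [("a", 1)]), ("end", [])], "start", "end")

def Spec_delete_unconnected_nodes (graph_dict : List (String × List (String × Int))) (start_node_name : String) (end_node_name : String) (out : List (String × List (String × Int))) : Prop := out = delete_unconnected_nodes_alt graph_dict start_node_name end_node_name
instance (graph_dict : List (String × List (String × Int))) (start_node_name : String) (end_node_name : String) (out : List (String × List (String × Int))) : Decidable (Spec_delete_unconnected_nodes graph_dict start_node_name end_node_name out) := by unfold Spec_delete_unconnected_nodes; infer_instance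

-- ===== CLAIM (what is proved, stated in full; the proofs are below) =====
def Claim_equal_delete_unconnected_nodes : Prop := ∀ (graph_dict : List (String × List (String × Int))) (start_node_name : String) (end_node_name : String), Dom_delete_unconnected_nodes graph_dict start_node_name end_node_name → Pre_delete_unconnected_nodes graph_dict start_node_name end_node_name → Spec_delete_unconnected_nodes graph_dict start_node_name end_node_name (delete_unconnected_nodes graph_dict start_node_name end_node_name)

-- ===== LEMMAS AND PROOFS =====

def pvKeys (g : pvG) : List String := g.map Prod.fst
theorem pvIsKey_iff (g : pvG) (t : String) : pvIsKey g t = true ↔ t ∈ pvKeys g := by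
  constructor
  · intro h
    rcases List.any_eq_true.mp h with ⟨q, hq, he⟩
    exact List.mem_map.mpr ⟨q, hq, (beq_iff_eq.mp he)⟩
  · intro h
    rcases List.mem_map.mp h with ⟨q, hq, he⟩
    exact List.any_eq_true.mpr ⟨q, hq, beq_iff_eq.mpr he⟩
def pvPrune (g : pvG) (S : List String) : pvG :=
  g.filterMap (fun kv =>
    if kv.1 ∈ S then
      some (kv.1, kv.2.filter (fun t => !(pvIsKey g t.1) || decide (t.1 ∈ S)))
    else none)
theorem pvPrune_congr (g : pvG) {S T : List String} (h : ∀ x, x ∈ S ↔ x ∈ T) :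
    pvPrune g S = pvPrune g T := by
  unfold pvPrune
  apply List.filterMap_congr
  intro kv _
  simp only [h]
theorem pvPrune_keys (g : pvG) : pvPrune g (pvKeys g) = g := by
  unfold pvPrune
  have h : ∀ kv ∈ g, (if kv.1 ∈ pvKeys g then
      some (kv.1, kv.2.filter (fun t => !(pvIsKey g t.1) || decide (t.1 ∈ pvKeys g)))
    else none) = some kv := by
    intro kv hkv
    rw [if_pos (by exact List.mem_map_of_mem hkv)]
    have : kv.2.filter (fun t => !(pvIsKey g t.1) || decide (t.1 ∈ pvKeys g)) = kv.2 := by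
      apply List.filter_eq_self.mpr
      intro t _
      by_cases ht : t.1 ∈ pvKeys g
      · simp [ht]
      · have : pvIsKey g t.1 = false := by
          cases hb : pvIsKey g t.1
          · rfl
          · exact absurd ((pvIsKey_iff g t.1).mp hb) ht
        simp [this]
    rw [this]
  rw [List.filterMap_congr h, List.filterMap_some]
theorem mem_pvPrune (g : pvG) (S : List String) (q : String × List (String × Int)) :
    q ∈ pvPrune g S ↔ ∃ kv ∈ g, kv.1 ∈ S ∧
      q = (kv.1, kv.2.filter (fun t => !(pvIsKey g t.1) || decide (t.1 ∈ S))) := by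
  unfold pvPrune
  rw [List.mem_filterMap]
  constructor
  · rintro ⟨kv, hkv, h⟩
    by_cases hm : kv.1 ∈ S
    · exact ⟨kv, hkv, hm, by simp [hm] at h; exact h.symm⟩
    · simp [hm] at h
  · rintro ⟨kv, hkv, hm, rfl⟩
    exact ⟨kv, hkv, by simp [hm]⟩
def pvOk (g : pvG) (s e : String) (S : List String) (k : String) : Prop :=
  k = s ∨ k = e ∨
    ((∃ pe ∈ g, pe.1 ∈ S ∧ ∃ sc ∈ pe.2, sc.1 = k) ∧
     (∃ kv ∈ g, kv.1 = k ∧ ∃ t ∈ kv.2, t.1 ∉ pvKeys g ∨ t.1 ∈ S))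
def pvFix (g : pvG) (s e : String) (S : List String) : Prop := ∀ k ∈ S, pvOk g s e S k
theorem pvOk_mono (g : pvG) (s e : String) {S T : List String} (h : ∀ x ∈ S, x ∈ T) {k : String}
    (hk : pvOk g s e S k) : pvOk g s e T k := by
  rcases hk with h1 | h2 | ⟨⟨pe, hpe, hpS, hsc⟩, ⟨kv, hkv, hk1, t, ht, hcond⟩⟩
  · exact Or.inl h1
  · exact Or.inr (Or.inl h2)
  · refine Or.inr (Or.inr ⟨⟨pe, hpe, h _ hpS, hsc⟩, ⟨kv, hkv, hk1, t, ht, ?_⟩⟩)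
    rcases hcond with hc | hc
    · exact Or.inl hc
    · exact Or.inr (h _ hc)

-- inner predecessor fold membership
theorem mem_innerFold (row : List (String × Int)) (ev x p : String) (acc : List String) :
    x ∈ row.foldl (fun ps sc => if sc.1 = ev then ps ++ [p] else ps) acc ↔
      x ∈ acc ∨ (x = p ∧ ∃ sc ∈ row, sc.1 = ev) := by
  induction row generalizing acc with
  | nil => simp
  | cons sc row ih =>
    simp only [List.foldl_cons]
    by_cases h : sc.1 = ev
    · rw [if_pos h, ih]
      simp only [List.mem_append, List.mem_singleton, List.mem_cons]
      constructor
      · rintro (⟨hx | hx⟩ | ⟨hx, sc', hsc', hev⟩)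
        · exact Or.inl hx
        · exact Or.inr ⟨hx.resolve_right (by simp), sc, Or.inl rfl, h⟩
        · exact Or.inr ⟨hx, sc', Or.inr hsc', hev⟩
      · rintro (hx | ⟨hx, sc', hsc', hev⟩)
        · exact Or.inl (Or.inl hx)
        · exact Or.inl (Or.inr (Or.inl hx))
    · rw [if_neg h, ih]
      constructor
      · rintro (hx | ⟨hx, sc', hsc', hev⟩)
        · exact Or.inl hx
        · exact Or.inr ⟨hx, sc', List.mem_cons_of_mem _ hsc', hev⟩
      · rintro (hx | ⟨hx, sc', hsc', hev⟩)
        · exact Or.inl hx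
        · rcases List.mem_cons.mp hsc' with rfl | hm
          · exact absurd hev h
          · exact Or.inr ⟨hx, sc', hm, hev⟩

def pvPredsFold (temp : pvG) (ev : String) (acc : List String) : List String :=
  temp.foldl (fun ps es => es.2.foldl (fun ps' sc => if sc.1 = ev then ps' ++ [es.1] else ps') ps) acc

theorem mem_pvPredsFold (temp : pvG) (ev x : String) (acc : List String) :
    x ∈ pvPredsFold temp ev acc ↔ x ∈ acc ∨ ∃ pe ∈ temp, pe.1 = x ∧ ∃ sc ∈ pe.2, sc.1 = ev := by
  induction temp generalizing acc with
  | nil => simp [pvPredsFold]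
  | cons es temp ih =>
    unfold pvPredsFold
    simp only [List.foldl_cons]
    rw [show (List.foldl (fun ps es => es.2.foldl (fun ps' sc => if sc.1 = ev then ps' ++ [es.1] else ps') ps) _ temp) = pvPredsFold temp ev _ from rfl, ih, mem_innerFold]
    constructor
    · rintro (⟨hx | ⟨hx, hsc⟩⟩ | ⟨pe, hpe, hp1, hsc⟩)
      · exact Or.inl hx
      · exact Or.inr ⟨es, List.mem_cons_self, hx.symm, hsc⟩
      · exact Or.inr ⟨pe, List.mem_cons_of_mem _ hpe, hp1, hsc⟩
    · rintro (hx | ⟨pe, hpe, hp1, hsc⟩)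
      · exact Or.inl (Or.inl hx)
      · rcases List.mem_cons.mp hpe with rfl | hm
        · exact Or.inl (Or.inr ⟨hp1.symm, hsc⟩)
        · exact Or.inr ⟨pe, hm, hp1, hsc⟩
def pvSuccFold (temp : pvG) (node : String) (acc : List (String × Int)) : List (String × Int) :=
  temp.foldl (fun sAcc es => if es.1 = node ∧ es.2 ≠ [] then es.2 else sAcc) acc

theorem pvFindNSP_pair (temp : pvG) (node : String) : ∀ (accp : List String) (accs : List (String × Int)),
    temp.foldl (fun acc es =>
      (es.2.foldl (fun ps sc => if sc.1 = node then ps ++ [es.1] else ps) acc.1,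
       if es.1 = node ∧ es.2 ≠ [] then es.2 else acc.2)) (accp, accs)
    = (pvPredsFold temp node accp, pvSuccFold temp node accs) := by
  induction temp with
  | nil => intro accp accs; simp [pvPredsFold, pvSuccFold]
  | cons es temp ih =>
    intro accp accs
    simp only [List.foldl_cons]
    rw [ih]
    rfl

theorem pvSuccFold_nil_iff (temp : pvG) (node : String) (acc : List (String × Int)) :
    pvSuccFold temp node acc = [] ↔ (acc = [] ∧ ∀ kv ∈ temp, kv.1 = node → kv.2 = []) := by
  induction temp generalizing acc with
  | nil => simp [pvSuccFold]
  | cons es temp ih =>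
    unfold pvSuccFold
    simp only [List.foldl_cons]
    rw [show (List.foldl _ _ temp) = pvSuccFold temp node _ from rfl, ih]
    by_cases h : es.1 = node ∧ es.2 ≠ []
    · rw [if_pos h]
      constructor
      · rintro ⟨h2, _⟩; exact absurd h2 h.2
      · rintro ⟨_, hall⟩
        exact absurd (hall es List.mem_cons_self h.1) h.2
    · rw [if_neg h]
      constructor
      · rintro ⟨ha, hall⟩
        refine ⟨ha, ?_⟩
        intro kv hkv h1
        rcases List.mem_cons.mp hkv with rfl | hm
        · by_contra hne
          exact h ⟨h1, hne⟩
        · exact hall kv hm h1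
      · rintro ⟨ha, hall⟩
        exact ⟨ha, fun kv hkv h1 => hall kv (List.mem_cons_of_mem _ hkv) h1⟩
theorem pvCond_iff (g : pvG) (S : List String) (t : String) :
    ((!(pvIsKey g t) || decide (t ∈ S)) = true) ↔ (t ∉ pvKeys g ∨ t ∈ S) := by
  by_cases h : t ∈ pvKeys g
  · have : pvIsKey g t = true := (pvIsKey_iff g t).mpr h
    simp [this, h]
  · have : pvIsKey g t = false := by
      cases hb : pvIsKey g t
      · rfl
      · exact absurd ((pvIsKey_iff g t).mp hb) h
    simp [this, h]

theorem pvPreds_nil_iff (g : pvG) (S : List String) (ev : String) (hev : ev ∈ S) :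
    pvPredsFold (pvPrune g S) ev [] = [] ↔ ¬ ∃ pe ∈ g, pe.1 ∈ S ∧ ∃ sc ∈ pe.2, sc.1 = ev := by
  rw [List.eq_nil_iff_forall_not_mem]
  constructor
  · intro hall ⟨pe, hpe, hpS, sc, hsc, hev'⟩
    apply hall pe.1
    rw [mem_pvPredsFold]
    refine Or.inr ⟨(pe.1, pe.2.filter (fun t => !(pvIsKey g t.1) || decide (t.1 ∈ S))), ?_, rfl, sc, ?_, hev'⟩
    · rw [mem_pvPrune]; exact ⟨pe, hpe, hpS, rfl⟩
    · apply List.mem_filter.mpr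
      refine ⟨hsc, (pvCond_iff g S sc.1).mpr ?_⟩
      rw [hev']; exact Or.inr hev
  · intro hno x hx
    rw [mem_pvPredsFold] at hx
    rcases hx with hx | ⟨pe, hpe, hp1, sc, hsc, hev'⟩
    · simp at hx
    · rw [mem_pvPrune] at hpe
      rcases hpe with ⟨kv, hkv, hkS, rfl⟩
      exact hno ⟨kv, hkv, hkS, sc, (List.mem_filter.mp hsc).1, hev'⟩

theorem pvSucc_nil_iff (g : pvG) (S : List String) (ev : String) (hev : ev ∈ S) :
    pvSuccFold (pvPrune g S) ev [] = [] ↔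
      ¬ ∃ kv ∈ g, kv.1 = ev ∧ ∃ t ∈ kv.2, (t.1 ∉ pvKeys g ∨ t.1 ∈ S) := by
  rw [pvSuccFold_nil_iff]
  constructor
  · rintro ⟨_, hall⟩ ⟨kv, hkv, hk1, t, ht, hcond⟩
    have hmem : (kv.1, kv.2.filter (fun t => !(pvIsKey g t.1) || decide (t.1 ∈ S))) ∈ pvPrune g S := by
      rw [mem_pvPrune]; exact ⟨kv, hkv, hk1 ▸ hev, rfl⟩
    have := hall _ hmem hk1
    rw [List.eq_nil_iff_forall_not_mem] at this
    exact this t (List.mem_filter.mpr ⟨ht, (pvCond_iff g S t.1).mpr hcond⟩)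
  · intro hno
    refine ⟨rfl, ?_⟩
    intro kv' hkv' h1
    rw [mem_pvPrune] at hkv'
    rcases hkv' with ⟨kv, hkv, hkS, rfl⟩
    simp only at h1
    rw [List.eq_nil_iff_forall_not_mem]
    intro t ht
    rcases List.mem_filter.mp ht with ⟨htm, hcond⟩
    exact hno ⟨kv, hkv, h1, t, htm, (pvCond_iff g S t.1).mp hcond⟩
theorem pvFindNSP_eq (temp : pvG) (node : String) :
    pvFindNSP temp node = (pvPredsFold temp node [], pvSuccFold temp node []) := by
  unfold pvFindNSP
  exact pvFindNSP_pair temp node [] []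

-- a node of the pruned graph is violating iff it is not pvOk
theorem pvViol_iff (g : pvG) (S : List String) (ev s e : String)
    (hev : ev ∈ S) (hs : ¬(ev = s ∨ ev = e)) :
    ((pvFindNSP (pvPrune g S) ev).1 = [] ∨ (pvFindNSP (pvPrune g S) ev).2 = []) ↔
      ¬ pvOk g s e S ev := by
  rw [pvFindNSP_eq]
  simp only
  rw [pvPreds_nil_iff g S ev hev, pvSucc_nil_iff g S ev hev]
  unfold pvOk
  constructor
  · rintro (h | h) hok
    · rcases hok with h1 | h1 | ⟨hp, _⟩
      · exact hs (Or.inl h1)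
      · exact hs (Or.inr h1)
      · exact h hp
    · rcases hok with h1 | h1 | ⟨_, hq⟩
      · exact hs (Or.inl h1)
      · exact hs (Or.inr h1)
      · exact h hq
  · intro hnok
    by_contra hc
    push_neg at hc
    exact hnok (Or.inr (Or.inr ⟨hc.1, hc.2⟩))

theorem pvScan_spec (g : pvG) (S : List String) (s e : String) :
    ∀ l : pvG, (∀ kv ∈ l, kv ∈ pvPrune g S) →
      (pvScan (pvPrune g S) s e l = none ∧ ∀ kv ∈ l, pvOk g s e S kv.1)
      ∨ (∃ ev, pvScan (pvPrune g S) s e l = some (ev, (pvFindNSP (pvPrune g S) ev).1) ∧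
          ev ∈ S ∧ ¬ pvOk g s e S ev) := by
  intro l
  induction l with
  | nil => intro _; exact Or.inl ⟨rfl, by simp⟩
  | cons kv rest ih =>
    intro hsub
    have hkvS : kv.1 ∈ S := by
      have := hsub kv List.mem_cons_self
      rw [mem_pvPrune] at this
      rcases this with ⟨kv', _, hS', rfl⟩
      exact hS'
    by_cases hse : kv.1 = s ∨ kv.1 = e
    · rcases ih (fun q hq => hsub q (List.mem_cons_of_mem _ hq)) with ⟨hn, hall⟩ | ⟨ev, hsome, hevS, hnok⟩
      · refine Or.inl ⟨?_, ?_⟩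
        · unfold pvScan; rw [if_pos hse]; exact hn
        · intro q hq
          rcases List.mem_cons.mp hq with rfl | hm
          · rcases hse with h | h
            · exact Or.inl h
            · exact Or.inr (Or.inl h)
          · exact hall q hm
      · refine Or.inr ⟨ev, ?_, hevS, hnok⟩
        unfold pvScan; rw [if_pos hse]; exact hsome
    · by_cases hviol : (pvFindNSP (pvPrune g S) kv.1).1 = [] ∨ (pvFindNSP (pvPrune g S) kv.1).2 = []
      · refine Or.inr ⟨kv.1, ?_, hkvS, (pvViol_iff g S kv.1 s e hkvS hse).mp hviol⟩
        unfold pvScan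
        rw [if_neg hse]
        simp only
        rw [if_pos hviol]
      · rcases ih (fun q hq => hsub q (List.mem_cons_of_mem _ hq)) with ⟨hn, hall⟩ | ⟨ev, hsome, hevS, hnok⟩
        · refine Or.inl ⟨?_, ?_⟩
          · unfold pvScan; rw [if_neg hse]; simp only; rw [if_neg hviol]; exact hn
          · intro q hq
            rcases List.mem_cons.mp hq with rfl | hm
            · exact not_not.mp (fun h => hviol ((pvViol_iff g S q.1 s e hkvS hse).mpr h))
            · exact hall q hm
        · refine Or.inr ⟨ev, ?_, hevS, hnok⟩
          unfold pvScan; rw [if_neg hse]; simp only; rw [if_neg hviol]; exact hsome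
-- ===== step lemma machinery =====
theorem pvFilter_idem (c : String × Int → Bool) (r : List (String × Int)) :
    (r.filter c).filter c = r.filter c := by
  rw [List.filter_filter]
  apply List.filter_congr
  intro x _
  rw [Bool.and_self]

theorem pvFoldMap (ev : String) : ∀ (ps : List String) (t : pvG),
    ps.foldl (fun t p => t.map (fun q => if q.1 = p then (q.1, q.2.filter (fun sc => decide (sc.1 ≠ ev))) else q)) t
    = t.map (fun q => if q.1 ∈ ps then (q.1, q.2.filter (fun sc => decide (sc.1 ≠ ev))) else q) := by
  intro ps
  induction ps with
  | nil =>
    intro t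
    simp only [List.foldl_nil, List.not_mem_nil, if_neg (fun h => h)]
    simp
  | cons p ps ih =>
    intro t
    simp only [List.foldl_cons]
    rw [ih, List.map_map]
    apply List.map_congr_left
    intro q _
    simp only [Function.comp]
    by_cases h1 : q.1 = p
    · rw [if_pos h1]
      simp only
      by_cases h2 : q.1 ∈ ps
      · rw [if_pos h2, if_pos (List.mem_cons.mpr (Or.inl h1)), pvFilter_idem]
      · rw [if_neg h2, if_pos (List.mem_cons.mpr (Or.inl h1))]
    · rw [if_neg h1]
      by_cases h2 : q.1 ∈ ps
      · rw [if_pos h2, if_pos (List.mem_cons.mpr (Or.inr h2))]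
      · rw [if_neg h2, if_neg (by intro h; rcases List.mem_cons.mp h with h | h; exact h1 h; exact h2 h)]

theorem pvKeys_pruneAux_sublist (g0 : pvG) (S : List String) : ∀ l : pvG,
    ((l.filterMap (fun kv => if kv.1 ∈ S then some (kv.1, kv.2.filter (fun t => !(pvIsKey g0 t.1) || decide (t.1 ∈ S))) else none)).map Prod.fst).Sublist (l.map Prod.fst) := by
  intro l
  induction l with
  | nil => simp
  | cons kv l ih =>
    rw [List.filterMap_cons]
    by_cases h : kv.1 ∈ S
    · rw [if_pos h]
      simp only [List.map_cons]
      exact List.Sublist.cons₂ _ ih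
    · rw [if_neg h]
      simp only [List.map_cons]
      exact List.Sublist.cons _ ih

theorem pvKeys_prune_sublist (g : pvG) (S : List String) :
    (pvKeys (pvPrune g S)).Sublist (pvKeys g) :=
  pvKeys_pruneAux_sublist g S g

theorem pvPredsEntry (temp : pvG) (ev : String) (hnd : (pvKeys temp).Nodup)
    (q : String × List (String × Int)) (hq : q ∈ temp) :
    q.1 ∈ pvPredsFold temp ev [] ↔ ∃ sc ∈ q.2, sc.1 = ev := by
  rw [mem_pvPredsFold]
  constructor
  · rintro (h | ⟨pe, hpe, hp1, hsc⟩)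
    · simp at h
    · have : pe = q := List.inj_on_of_nodup_map hnd hpe hq hp1
      exact this ▸ hsc
  · intro h
    exact Or.inr ⟨q, hq, rfl, h⟩
theorem pvRowCond (g : pvG) (S : List String) (ev : String) (hS : S.Nodup)
    (hevk : ev ∈ pvKeys g) (x : String) :
    ((!(pvIsKey g x) || decide (x ∈ S)) && decide (x ≠ ev))
      = (!(pvIsKey g x) || decide (x ∈ S.erase ev)) := by
  by_cases hk : x ∈ pvKeys g
  · have hkb : pvIsKey g x = true := (pvIsKey_iff g x).mpr hk
    by_cases hx : x = ev
    · subst hx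
      have : x ∉ S.erase x := fun h => ((hS.mem_erase_iff).mp h).1 rfl
      simp [hkb, this]
    · simp [hkb, hx, hS.mem_erase_iff]
  · have hkb : pvIsKey g x = false := by
      cases hb : pvIsKey g x
      · rfl
      · exact absurd ((pvIsKey_iff g x).mp hb) hk
    have hx : x ≠ ev := fun h => hk (h ▸ hevk)
    simp [hkb, hx]

theorem pvStepAux (g : pvG) (S : List String) (ev : String) (hS : S.Nodup)
    (hevk : ev ∈ pvKeys g) : ∀ l : pvG,
    ((l.filterMap (fun kv => if kv.1 ∈ S then some (kv.1, kv.2.filter (fun t => !(pvIsKey g t.1) || decide (t.1 ∈ S))) else none)).filter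
        (fun q => decide (q.1 ≠ ev))).map
        (fun q => (q.1, q.2.filter (fun sc => decide (sc.1 ≠ ev))))
      = l.filterMap (fun kv => if kv.1 ∈ S.erase ev then some (kv.1, kv.2.filter (fun t => !(pvIsKey g t.1) || decide (t.1 ∈ S.erase ev))) else none) := by
  intro l
  induction l with
  | nil => rfl
  | cons kv l ih =>
    rw [List.filterMap_cons, List.filterMap_cons]
    by_cases hm : kv.1 ∈ S
    · rw [if_pos hm]
      by_cases hx : kv.1 = ev
      · have hm' : kv.1 ∉ S.erase ev := fun h => ((hS.mem_erase_iff).mp h).1 hx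
        rw [if_neg hm']
        rw [List.filter_cons_of_neg (by simpa using hx)]
        exact ih
      · have hm' : kv.1 ∈ S.erase ev := (hS.mem_erase_iff).mpr ⟨hx, hm⟩
        rw [if_pos hm']
        rw [List.filter_cons_of_pos (by simpa using hx), List.map_cons, ih]
        congr 1
        simp only
        rw [List.filter_filter]
        congr 1
        apply List.filter_congr
        intro sc _
        rw [Bool.and_comm]
        exact pvRowCond g S ev hS hevk sc.1
    · rw [if_neg hm]
      have hm' : kv.1 ∉ S.erase ev := fun h => hm ((hS.mem_erase_iff).mp h).2
      rw [if_neg hm']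
      exact ih

theorem pvStep (g : pvG) (S : List String) (ev : String) (hS : S.Nodup)
    (hevk : ev ∈ pvKeys g) :
    ((pvPrune g S).filter (fun q => decide (q.1 ≠ ev))).map
        (fun q => (q.1, q.2.filter (fun sc => decide (sc.1 ≠ ev))))
      = pvPrune g (S.erase ev) :=
  pvStepAux g S ev hS hevk g
theorem pvA_run (g : pvG) (s e : String) (hg : (pvKeys g).Nodup) :
    ∀ (fuel : Nat) (S : List String), S.Nodup → (∀ x ∈ S, x ∈ pvKeys g) → S.length < fuel →
    ∃ S', S'.Nodup ∧ (∀ x ∈ S', x ∈ S) ∧ (∀ x ∈ S', x ∈ pvKeys g) ∧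
      pvALoop s e fuel (pvPrune g S) = pvPrune g S' ∧ pvFix g s e S' ∧
      (∀ T, pvFix g s e T → (∀ x ∈ T, x ∈ S) → ∀ x ∈ T, x ∈ S') := by
  intro fuel
  induction fuel with
  | zero => intro S _ _ h; omega
  | succ fuel ih =>
    intro S hS hSk hlen
    rcases pvScan_spec g S s e (pvPrune g S) (fun q hq => hq) with ⟨hn, hall⟩ | ⟨ev, hsome, hevS, hnok⟩
    · refine ⟨S, hS, fun x h => h, hSk, ?_, ?_, fun T _ hTS => hTS⟩
      · show pvALoop s e (fuel+1) (pvPrune g S) = pvPrune g S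
        simp only [pvALoop, hn]
      · intro k hk
        rcases List.mem_map.mp (hSk k hk) with ⟨kv, hkv, hk1⟩
        have hpe : (kv.1, kv.2.filter (fun t => !(pvIsKey g t.1) || decide (t.1 ∈ S))) ∈ pvPrune g S :=
          (mem_pvPrune g S _).mpr ⟨kv, hkv, by rw [hk1]; exact hk, rfl⟩
        have := hall _ hpe
        simpa [hk1] using this
    · have hevk : ev ∈ pvKeys g := hSk ev hevS
      have hndt : (pvKeys (pvPrune g S)).Nodup := (pvKeys_prune_sublist g S).nodup hg
      have ht2 : ((pvFindNSP (pvPrune g S) ev).1).foldl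
          (fun t p => t.map (fun q => if q.1 = p then (q.1, q.2.filter (fun sc => decide (sc.1 ≠ ev))) else q))
          ((pvPrune g S).filter (fun q => decide (q.1 ≠ ev)))
          = pvPrune g (S.erase ev) := by
        rw [pvFindNSP_eq]
        simp only
        rw [pvFoldMap]
        rw [show ((pvPrune g S).filter (fun q => decide (q.1 ≠ ev))).map
              (fun q => if q.1 ∈ pvPredsFold (pvPrune g S) ev [] then (q.1, q.2.filter (fun sc => decide (sc.1 ≠ ev))) else q)
            = ((pvPrune g S).filter (fun q => decide (q.1 ≠ ev))).map
              (fun q => (q.1, q.2.filter (fun sc => decide (sc.1 ≠ ev)))) from ?_]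
        · exact pvStep g S ev hS hevk
        · apply List.map_congr_left
          intro q hq
          by_cases hp : q.1 ∈ pvPredsFold (pvPrune g S) ev []
          · rw [if_pos hp]
          · rw [if_neg hp]
            have hqt : q ∈ pvPrune g S := (List.mem_filter.mp hq).1
            have hno : ¬ ∃ sc ∈ q.2, sc.1 = ev := fun h => hp ((pvPredsEntry _ ev hndt q hqt).mpr h)
            have : q.2.filter (fun sc => decide (sc.1 ≠ ev)) = q.2 := by
              apply List.filter_eq_self.mpr
              intro sc hsc
              simp only [decide_eq_true_eq]
              exact fun hscev => hno ⟨sc, hsc, hscev⟩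
            rw [show (q.1, q.2.filter (fun sc => decide (sc.1 ≠ ev))) = q from by rw [this]]
      have hALoop : pvALoop s e (fuel+1) (pvPrune g S) = pvALoop s e fuel (pvPrune g (S.erase ev)) := by
        simp only [pvALoop, hsome]
        rw [ht2]
      have hlen' : (S.erase ev).length < fuel := by
        have h1 : (S.erase ev).length = S.length - 1 := List.length_erase_of_mem hevS
        have h2 : 0 < S.length := List.length_pos_of_mem hevS
        omega
      rcases ih (S.erase ev) (hS.erase ev) (fun x hx => hSk x (List.mem_of_mem_erase hx)) hlen'
        with ⟨S', h1, h2, h3, h4, h5, h6⟩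
      refine ⟨S', h1, fun x hx => List.mem_of_mem_erase (h2 x hx), h3, by rw [hALoop]; exact h4, h5, ?_⟩
      intro T hTfix hTS x hx
      have hevT : ev ∉ T := fun hevT => hnok (pvOk_mono g s e hTS (hTfix ev hevT))
      exact h6 T hTfix (fun y hy => (hS.mem_erase_iff).mpr ⟨fun hye => hevT (hye ▸ hy), hTS y hy⟩) x hx
theorem pvSetAdd_nodup (s : List String) (x : String) (h : s.Nodup) : (PySem.Set.add s x).Nodup := by
  simp only [PySem.Set.add]
  split
  · exact h
  · rename_i hc
    have hm : x ∉ s := by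
      intro hx
      exact hc (by simpa [PySem.Set.contains] using hx)
    apply List.Nodup.append h (List.nodup_singleton x)
    intro a ha hax
    exact hm (by simpa using (List.mem_singleton.mp hax) ▸ ha)

theorem pvMem_setAdd (s : List String) (x y : String) : y ∈ PySem.Set.add s x ↔ y = x ∨ y ∈ s := by
  simp only [PySem.Set.add]
  split
  · rename_i hc
    constructor
    · exact Or.inr
    · rintro (rfl | h)
      · simpa using hc
      · exact h
  · simp [or_comm]
theorem pvRoundFold_mem (g : pvG) (s e : String) (alive : List String) :
    ∀ (l : pvG) (acc : List String) (x : String),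
    x ∈ l.foldl (fun keep kv =>
      if kv.1 ∈ alive then
        if kv.1 = s ∨ kv.1 = e then PySem.Set.add keep kv.1
        else
          if (g.any (fun pe => decide (pe.1 ∈ alive) && pe.2.any (fun sc => sc.1 == kv.1)))
              && (kv.2.any (fun t => !(pvIsKey g t.1) || decide (t.1 ∈ alive)))
          then PySem.Set.add keep kv.1
          else keep
      else keep) acc
    ↔ x ∈ acc ∨ ∃ kv ∈ l, kv.1 = x ∧ kv.1 ∈ alive ∧
        (kv.1 = s ∨ kv.1 = e ∨
          ((g.any (fun pe => decide (pe.1 ∈ alive) && pe.2.any (fun sc => sc.1 == kv.1))) = true ∧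
           (kv.2.any (fun t => !(pvIsKey g t.1) || decide (t.1 ∈ alive))) = true)) := by
  intro l
  induction l with
  | nil => intro acc x; simp
  | cons kv l ih =>
    intro acc x
    simp only [List.foldl_cons]
    rw [ih]
    by_cases h1 : kv.1 ∈ alive
    · by_cases h2 : kv.1 = s ∨ kv.1 = e
      · rw [if_pos h1, if_pos h2]
        constructor
        · rintro (hx | hrest)
          · rcases (pvMem_setAdd acc kv.1 x).mp hx with rfl | hx
            · exact Or.inr ⟨kv, List.mem_cons_self, rfl, h1, by rcases h2 with h | h; exact Or.inl h; exact Or.inr (Or.inl h)⟩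
            · exact Or.inl hx
          · rcases hrest with ⟨kv', hkv', rest⟩
            exact Or.inr ⟨kv', List.mem_cons_of_mem _ hkv', rest⟩
        · rintro (hx | ⟨kv', hkv', hx, hal, hcond⟩)
          · exact Or.inl ((pvMem_setAdd acc kv.1 x).mpr (Or.inr hx))
          · rcases List.mem_cons.mp hkv' with rfl | hm
            · exact Or.inl ((pvMem_setAdd acc kv'.1 x).mpr (Or.inl hx.symm))
            · exact Or.inr ⟨kv', hm, hx, hal, hcond⟩
      · rw [if_pos h1, if_neg h2]
        by_cases h3 : ((g.any (fun pe => decide (pe.1 ∈ alive) && pe.2.any (fun sc => sc.1 == kv.1)))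
              && (kv.2.any (fun t => !(pvIsKey g t.1) || decide (t.1 ∈ alive)))) = true
        · rw [if_pos h3]
          constructor
          · rintro (hx | hrest)
            · rcases (pvMem_setAdd acc kv.1 x).mp hx with rfl | hx
              · exact Or.inr ⟨kv, List.mem_cons_self, rfl, h1, Or.inr (Or.inr (Bool.and_eq_true_iff.mp h3))⟩
              · exact Or.inl hx
            · rcases hrest with ⟨kv', hkv', rest⟩
              exact Or.inr ⟨kv', List.mem_cons_of_mem _ hkv', rest⟩
          · rintro (hx | ⟨kv', hkv', hx, hal, hcond⟩)
            · exact Or.inl ((pvMem_setAdd acc kv.1 x).mpr (Or.inr hx))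
            · rcases List.mem_cons.mp hkv' with rfl | hm
              · exact Or.inl ((pvMem_setAdd acc kv'.1 x).mpr (Or.inl hx.symm))
              · exact Or.inr ⟨kv', hm, hx, hal, hcond⟩
        · rw [if_neg h3]
          constructor
          · rintro (hx | ⟨kv', hkv', rest⟩)
            · exact Or.inl hx
            · exact Or.inr ⟨kv', List.mem_cons_of_mem _ hkv', rest⟩
          · rintro (hx | ⟨kv', hkv', hx, hal, hcond⟩)
            · exact Or.inl hx
            · rcases List.mem_cons.mp hkv' with rfl | hm
              · rcases hcond with hc | hc | hc
                · exact absurd (Or.inl hc) h2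
                · exact absurd (Or.inr hc) h2
                · exact absurd (Bool.and_eq_true_iff.mpr hc) h3
              · exact Or.inr ⟨kv', hm, hx, hal, hcond⟩
    · rw [if_neg h1]
      constructor
      · rintro (hx | ⟨kv', hkv', rest⟩)
        · exact Or.inl hx
        · exact Or.inr ⟨kv', List.mem_cons_of_mem _ hkv', rest⟩
      · rintro (hx | ⟨kv', hkv', hx, hal, hcond⟩)
        · exact Or.inl hx
        · rcases List.mem_cons.mp hkv' with rfl | hm
          · exact absurd hal h1
          · exact Or.inr ⟨kv', hm, hx, hal, hcond⟩

theorem pvRound_nodup (g : pvG) (s e : String) (alive : List String) :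
    (pvRound g s e alive).Nodup := by
  unfold pvRound
  suffices h : ∀ (l : pvG) (acc : List String), acc.Nodup →
      (l.foldl (fun keep kv =>
        if kv.1 ∈ alive then
          if kv.1 = s ∨ kv.1 = e then PySem.Set.add keep kv.1
          else
            if (g.any (fun pe => decide (pe.1 ∈ alive) && pe.2.any (fun sc => sc.1 == kv.1)))
                && (kv.2.any (fun t => !(pvIsKey g t.1) || decide (t.1 ∈ alive)))
            then PySem.Set.add keep kv.1
            else keep
        else keep) acc).Nodup by
    exact h g [] List.nodup_nil
  intro l
  induction l with
  | nil => intro acc h; exact h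
  | cons kv l ih =>
    intro acc h
    simp only [List.foldl_cons]
    apply ih
    by_cases h1 : kv.1 ∈ alive
    · by_cases h2 : kv.1 = s ∨ kv.1 = e
      · rw [if_pos h1, if_pos h2]; exact pvSetAdd_nodup acc kv.1 h
      · rw [if_pos h1, if_neg h2]
        split
        · exact pvSetAdd_nodup acc kv.1 h
        · exact h
    · rw [if_neg h1]; exact h

theorem mem_pvRound (g : pvG) (s e : String) (alive : List String) (hg : (pvKeys g).Nodup)
    (x : String) :
    x ∈ pvRound g s e alive ↔ x ∈ alive ∧ x ∈ pvKeys g ∧ pvOk g s e alive x := by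
  unfold pvRound
  rw [pvRoundFold_mem]
  simp only [List.not_mem_nil, false_or]
  constructor
  · rintro ⟨kv, hkv, rfl, hal, hcond⟩
    refine ⟨hal, List.mem_map_of_mem hkv, ?_⟩
    rcases hcond with h | h | ⟨hb1, hb2⟩
    · exact Or.inl h
    · exact Or.inr (Or.inl h)
    · refine Or.inr (Or.inr ⟨?_, ?_⟩)
      · rcases List.any_eq_true.mp hb1 with ⟨pe, hpe, hband⟩
        rcases Bool.and_eq_true_iff.mp hband with ⟨hd, hany⟩
        rcases List.any_eq_true.mp hany with ⟨sc, hsc, hbeq⟩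
        exact ⟨pe, hpe, of_decide_eq_true hd, sc, hsc, beq_iff_eq.mp hbeq⟩
      · rcases List.any_eq_true.mp hb2 with ⟨t, ht, hc⟩
        exact ⟨kv, hkv, rfl, t, ht, (pvCond_iff g alive t.1).mp hc⟩
  · rintro ⟨hal, hkx, hok⟩
    rcases List.mem_map.mp hkx with ⟨kv, hkv, hk1⟩
    refine ⟨kv, hkv, hk1, hk1 ▸ hal, ?_⟩
    rcases hok with rfl | rfl | ⟨⟨pe, hpe, hpal, sc, hsc, hsceq⟩, ⟨kv', hkv', hk1', t, ht, hc⟩⟩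
    · exact Or.inl hk1
    · exact Or.inr (Or.inl hk1)
    · refine Or.inr (Or.inr ⟨?_, ?_⟩)
      · apply List.any_eq_true.mpr
        exact ⟨pe, hpe, Bool.and_eq_true_iff.mpr ⟨decide_eq_true hpal,
          List.any_eq_true.mpr ⟨sc, hsc, beq_iff_eq.mpr (hsceq.trans hk1.symm)⟩⟩⟩
      · have hkveq : kv' = kv := List.inj_on_of_nodup_map hg hkv' hkv (hk1'.trans hk1.symm)
        apply List.any_eq_true.mpr
        exact ⟨t, hkveq ▸ ht, (pvCond_iff g alive t.1).mpr hc⟩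

theorem pvB_run (g : pvG) (s e : String) (hg : (pvKeys g).Nodup) :
    ∀ (fuel : Nat) (S : List String), S.Nodup → (∀ x ∈ S, x ∈ pvKeys g) → S.length < fuel →
    ∃ S', S'.Nodup ∧ (∀ x ∈ S', x ∈ S) ∧
      pvBLoop g s e fuel S = pvPrune g S' ∧ pvFix g s e S' ∧
      (∀ T, pvFix g s e T → (∀ x ∈ T, x ∈ S) → ∀ x ∈ T, x ∈ S') := by
  intro fuel
  induction fuel with
  | zero => intro S _ _ h; omega
  | succ fuel ih =>
    intro S hS hSk hlen
    have hkeepmem : ∀ x, x ∈ pvRound g s e S ↔ x ∈ S ∧ x ∈ pvKeys g ∧ pvOk g s e S x :=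
      fun x => mem_pvRound g s e S hg x
    have hkeepsub : ∀ x ∈ pvRound g s e S, x ∈ S := fun x hx => ((hkeepmem x).mp hx).1
    have hkeepnd : (pvRound g s e S).Nodup := pvRound_nodup g s e S
    have hfs : (pvRound g s e S).toFinset ⊆ S.toFinset := by
      intro x hx
      exact List.mem_toFinset.mpr (hkeepsub x (List.mem_toFinset.mp hx))
    by_cases hlenq : (pvRound g s e S).length = S.length
    · have heq : (pvRound g s e S).toFinset = S.toFinset := by
        apply Finset.eq_of_subset_of_card_le hfs
        rw [List.toFinset_card_of_nodup hkeepnd, List.toFinset_card_of_nodup hS, hlenq]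
      have hSsub : ∀ x ∈ S, x ∈ pvRound g s e S := by
        intro x hx
        exact List.mem_toFinset.mp (heq ▸ List.mem_toFinset.mpr hx)
      refine ⟨S, hS, fun x h => h, ?_, ?_, fun T _ hTS => hTS⟩
      · show pvBLoop g s e (fuel+1) S = pvPrune g S
        simp only [pvBLoop]
        rw [if_pos hlenq]
        rfl
      · intro k hk
        exact ((hkeepmem k).mp (hSsub k hk)).2.2
    · have hlt : (pvRound g s e S).length < S.length := by
        have hle : (pvRound g s e S).toFinset.card ≤ S.toFinset.card := Finset.card_le_card hfs
        rw [List.toFinset_card_of_nodup hkeepnd, List.toFinset_card_of_nodup hS] at hle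
        omega
      rcases ih (pvRound g s e S) hkeepnd (fun x hx => ((hkeepmem x).mp hx).2.1) (by omega)
        with ⟨S', h1, h2, h4, h5, h6⟩
      refine ⟨S', h1, fun x hx => hkeepsub x (h2 x hx), ?_, h5, ?_⟩
      · show pvBLoop g s e (fuel+1) S = pvPrune g S'
        simp only [pvBLoop]
        rw [if_neg hlenq]
        exact h4
      · intro T hTfix hTS x hx
        refine h6 T hTfix (fun y hy => ?_) x hx
        exact (hkeepmem y).mpr ⟨hTS y hy, hSk y (hTS y hy), pvOk_mono g s e hTS (hTfix y hy)⟩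

-- the two fuel loops both compute the graph pruned to the greatest fixpoint of pvOk
theorem pvMain (g : pvG) (s e : String) (hg : (g.map Prod.fst).Nodup) :
    delete_unconnected_nodes g s e = delete_unconnected_nodes_alt g s e := by
  have hgk : (pvKeys g).Nodup := hg
  have hsub : ∀ x ∈ pvKeys g, x ∈ pvKeys g := fun x h => h
  have hlenA : (pvKeys g).length < g.length + 1 := by
    simp [pvKeys]
  obtain ⟨Sa, hA1, hA2, hA3, hA4, hA5, hA6⟩ :=
    pvA_run g s e hgk (g.length + 1) (pvKeys g) hgk hsub hlenA
  obtain ⟨Sb, hB1, hB2, hB4, hB5, hB6⟩ :=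
    pvB_run g s e hgk (g.length + 2) (pvKeys g) hgk hsub (by simp [pvKeys])
  have hAeq : delete_unconnected_nodes g s e = pvPrune g Sa := by
    have h := hA4
    rw [pvPrune_keys g] at h
    exact h
  have hBeq : delete_unconnected_nodes_alt g s e = pvPrune g Sb := by
    show pvBLoop g s e (g.length + 2) (PySem.Set.ofList (g.map Prod.fst)) = pvPrune g Sb
    rw [PySem.Set.ofList_eq_self_of_nodup _ hg]
    exact hB4
  rw [hAeq, hBeq]
  apply pvPrune_congr
  intro x
  exact ⟨fun hx => hB6 Sa hA5 hA2 x hx, fun hx => hA6 Sb hB5 hB2 x hx⟩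

-- ===== VERDICT (by name: the statement is the Claim_ definition above) =====
theorem delete_unconnected_nodes_spec : Claim_equal_delete_unconnected_nodes := by
  intro graph_dict start_node_name end_node_name _ hpre
  unfold Spec_delete_unconnected_nodes
  exact pvMain graph_dict start_node_name end_node_name hpre.1
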